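-- pv_equiv track=rewrite | github.com/state-alchemists/zrb | src/zrb/util/match.py | _find_subsequence_range
-- ===== SOURCE A (Python) =====
-- def _find_subsequence_range(
--     hay: str, needle: str, start: int = 0
-- ) -> tuple[int, int] | None:
--     """
--     Try to locate needle in hay as a subsequence starting at `start`.
--     Returns (start_index, end_index) where end_index is the index AFTER the last matched character.
--     """
--     if not needle:
--         return start, start
--     i = start
--     j = 0
--     first_pos = None
--     while i < len(hay) and j < len(needle):
--         if hay[i] == needle[j]:
--             if first_pos is None:
--                 first_pos = i
--             j += 1
--         i += 1
--
--     if j == len(needle):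
--         return first_pos, i
--     return None
-- ===== SOURCE B (Python) =====
-- def _find_subsequence_range(
--     hay: str, needle: str, start: int = 0
-- ) -> tuple[int, int] | None:
--     """Index-based subsequence match: build a map from each character of hay to
--     its (increasing) list of occurrence indices once, then walk the needle,
--     consuming for each character its first occurrence at or after the current
--     position; per-character cursors make the whole walk amortized linear."""
--     if not needle:
--         return start, start
--     occ = {}
--     for i, ch in enumerate(hay):
--         occ.setdefault(ch, []).append(i)
--     cur = {}
--     pos = start
--     first_pos = None
--     for c in needle:
--         lst = occ.get(c, [])
--         k = cur.get(c, 0)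
--         while k < len(lst) and lst[k] < pos:
--             k += 1
--         cur[c] = k
--         if k == len(lst):
--             return None
--         idx = lst[k]
--         if first_pos is None:
--             first_pos = idx
--         pos = idx + 1
--     return first_pos, pos
-- ===== Notes on version B (the rewrite author's own statement) =====
-- stated objective: alternative
-- what changed: B builds, in one pass, a dictionary mapping each character of hay to its list of occurrence indices, then walks the needle consuming from each character's occurrence list (via a per-character cursor) its first index at or after the current position, instead of A's single character-by-character while-scan of hay with a needle pointer.
-- intended difference: On a nonempty needle with negative start whose first character occurs in hay[start:] and which is a subsequence of hay[start:]+hay, A's hay[i] wraps (negative indexing) so it scans the tail and then all of hay again and returns accidental negative/rescanned indices; B's occurrence lists hold only real non-negative indices, so it returns None or proper non-negative indices there, the intended behaviour. — e.g. on _find_subsequence_range("ab", "b", -1): A returns some (-1, 0), B returns some (1, 2)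
-- crash fix: On a nonempty needle with start < -len(hay), A raises IndexError (hay[i] out of range); B's occurrence lookup just searches from the start of hay and returns the normal result, e.g. (0, 1) on ('ab', 'a', -5). — e.g. on _find_subsequence_range("ab", "a", -5): A raises IndexError, B returns some (0, 1)
import Mathlib
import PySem

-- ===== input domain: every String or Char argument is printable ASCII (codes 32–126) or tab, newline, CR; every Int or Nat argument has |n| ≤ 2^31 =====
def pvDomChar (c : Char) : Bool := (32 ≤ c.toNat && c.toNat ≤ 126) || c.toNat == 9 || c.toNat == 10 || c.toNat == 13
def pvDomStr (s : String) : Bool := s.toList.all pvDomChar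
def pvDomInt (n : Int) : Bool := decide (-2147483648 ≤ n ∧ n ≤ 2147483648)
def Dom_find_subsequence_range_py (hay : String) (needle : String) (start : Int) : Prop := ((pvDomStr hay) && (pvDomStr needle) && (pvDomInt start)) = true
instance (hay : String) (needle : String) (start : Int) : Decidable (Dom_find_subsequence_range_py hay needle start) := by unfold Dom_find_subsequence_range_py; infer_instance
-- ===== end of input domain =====

-- B replaces A's character-by-character scan of hay by a two-stage algorithm: it first builds a
-- dictionary mapping each character of hay to its list of occurrence indices, then walks the
-- needle consuming from each character's list its first occurrence at or after the current position.

-- ===== PORT A =====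
-- A's while loop: state (i, j, first_pos); hay[i] is pyGet? (none = IndexError; there the
-- port just advances, which is reachable only outside Pre_).
-- (the loop's termination measure len(hay) - i is carried as explicit structural fuel so the
-- kernel can evaluate the port; pvALoop_unfold below recovers the plain while-loop unfolding)
def pvALoopF (h nd : List Char) (fuel : Nat) (i : Int) (j : Nat) (first : Option Int) : Option (Int × Int) :=
  match fuel with
  | 0 => if j = nd.length then first.map (fun f => (f, i)) else none
  | fuel' + 1 =>
    if i < (h.length : Int) ∧ j < nd.length then
      if PySem.List.pyGet? h i = PySem.List.pyGet? nd (j : Int) then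
        pvALoopF h nd fuel' (i + 1) (j + 1) (some (first.getD i))
      else
        pvALoopF h nd fuel' (i + 1) j first
    else
      if j = nd.length then first.map (fun f => (f, i)) else none

def pvALoop (h nd : List Char) (i : Int) (j : Nat) (first : Option Int) : Option (Int × Int) :=
  pvALoopF h nd ((h.length : Int) - i).toNat i j first

def find_subsequence_range_py (hay : String) (needle : String) (start : Int) : Option (Int × Int) :=
  if needle = "" then some (start, start)
  else pvALoop hay.toList needle.toList start 0 none

-- ===== PORT B =====
-- Source B's index-building pass: "for i, ch in enumerate(hay): occ.setdefault(ch, []).append(i)"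
-- (setdefault-then-append ≙ Dict.modify with default []).
def pvOcc (h : List Char) : PySem.Dict Char (List Int) :=
  (PySem.List.enumerate h).foldl (fun d p => d.modify p.2 [] (· ++ [p.1])) PySem.Dict.empty

-- Source B's inner "while k < len(lst) and lst[k] < pos: k += 1"
-- (fuel = lst.length - k carried so the kernel evaluates; lst.getD k 0 is exact
--  because it is only read under the k < lst.length conjunct)
def pvSkipF (lst : List Int) (pos : Int) : Nat → Nat → Nat
  | 0, k => k
  | fuel + 1, k =>
    if k < lst.length ∧ lst.getD k 0 < pos then pvSkipF lst pos fuel (k + 1) else k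

def pvSkip (lst : List Int) (pos : Int) (k : Nat) : Nat :=
  pvSkipF lst pos (lst.length - k) k

-- Source B's "for c in needle" loop: state (pos, first_pos, cur)
def pvBLoop (occ : PySem.Dict Char (List Int)) (cs : List Char) (pos : Int)
    (first : Option Int) (cur : PySem.Dict Char Nat) : Option (Int × Int) :=
  match cs with
  | [] => first.map (fun f => (f, pos))
  | c :: rest =>
    let lst := occ.getD c []
    let k := pvSkip lst pos (cur.getD c 0)
    if k = lst.length then none
    else pvBLoop occ rest (lst.getD k 0 + 1) (some (first.getD (lst.getD k 0))) (cur.insert c k)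

def find_subsequence_range_py_alt (hay : String) (needle : String) (start : Int) : Option (Int × Int) :=
  if needle = "" then some (start, start)
  else pvBLoop (pvOcc hay.toList) needle.toList start none PySem.Dict.empty

-- ===== PRECONDITION & SPEC =====
-- Pre_ excludes exactly the inputs on which A raises IndexError: a nonempty needle with
-- start < -len(hay) makes A index hay out of range.
def Pre_find_subsequence_range_py (hay : String) (needle : String) (start : Int) : Prop :=
  needle = "" ∨ -(hay.toList.length : Int) ≤ start
instance (hay : String) (needle : String) (start : Int) : Decidable (Pre_find_subsequence_range_py hay needle start) := by unfold Pre_find_subsequence_range_py; infer_instance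

def pvWitness_find_subsequence_range_py : String × String × Int := ("abcab", "bb", 0)

-- On a nonempty needle with negative start whose first character occurs in the tail hay[start:]
-- and which is a subsequence of hay[start:] + hay, A's hay[i] wraps (negative indexing), so it
-- scans the tail and then all of hay again and returns accidental negative/rescanned indices;
-- B's occurrence lists hold only real non-negative indices, so it returns None or proper
-- non-negative indices there, the intended behaviour.
def D_find_subsequence_range_py (hay : String) (needle : String) (start : Int) : Prop :=
  needle ≠ "" ∧ start < 0 ∧
    needle.toList.headI ∈ hay.toList.drop (hay.toList.length + start).toNat ∧
    needle.toList.Sublist ((hay.toList.drop (hay.toList.length + start).toNat) ++ hay.toList)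
instance (hay : String) (needle : String) (start : Int) : Decidable (D_find_subsequence_range_py hay needle start) := by unfold D_find_subsequence_range_py; infer_instance

def Spec_find_subsequence_range_py (hay : String) (needle : String) (start : Int) (out : Option (Int × Int)) : Prop := ¬ D_find_subsequence_range_py hay needle start → out = find_subsequence_range_py_alt hay needle start
instance (hay : String) (needle : String) (start : Int) (out : Option (Int × Int)) : Decidable (Spec_find_subsequence_range_py hay needle start out) := by unfold Spec_find_subsequence_range_py; infer_instance

def pvDiffWitness_find_subsequence_range_py : String × String × Int := ("ab", "b", -1)
def pvDiffWitnessOut_find_subsequence_range_py : (Option (Int × Int)) × (Option (Int × Int)) := (some (-1, 0), some (1, 2))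

-- OPTIONAL crash-fix block: on a nonempty needle with start < -len(hay), A raises
-- IndexError (hay[i] out of range) while B's occurrence lookup searches from the start
-- of hay and returns normally.
def Raises_find_subsequence_range_py (hay : String) (needle : String) (start : Int) : Prop :=
  needle ≠ "" ∧ start < -(hay.toList.length : Int)
instance (hay : String) (needle : String) (start : Int) : Decidable (Raises_find_subsequence_range_py hay needle start) := by unfold Raises_find_subsequence_range_py; infer_instance
def pvRaiseWitness_find_subsequence_range_py : String × String × Int := ("ab", "a", -5)
def pvRaiseWitnessOut_find_subsequence_range_py : Option (Int × Int) := some (0, 1)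

-- ===== CLAIM (what is proved, stated in full; the proofs are below) =====
def Claim_unchanged_find_subsequence_range_py : Prop := ∀ (hay : String) (needle : String) (start : Int), Dom_find_subsequence_range_py hay needle start → Pre_find_subsequence_range_py hay needle start → Spec_find_subsequence_range_py hay needle start (find_subsequence_range_py hay needle start)
def Claim_changed_find_subsequence_range_py : Prop := Dom_find_subsequence_range_py (pvDiffWitness_find_subsequence_range_py.1) (pvDiffWitness_find_subsequence_range_py.2.1) (pvDiffWitness_find_subsequence_range_py.2.2) ∧ Pre_find_subsequence_range_py (pvDiffWitness_find_subsequence_range_py.1) (pvDiffWitness_find_subsequence_range_py.2.1) (pvDiffWitness_find_subsequence_range_py.2.2) ∧ D_find_subsequence_range_py (pvDiffWitness_find_subsequence_range_py.1) (pvDiffWitness_find_subsequence_range_py.2.1) (pvDiffWitness_find_subsequence_range_py.2.2) ∧ find_subsequence_range_py (pvDiffWitness_find_subsequence_range_py.1) (pvDiffWitness_find_subsequence_range_py.2.1) (pvDiffWitness_find_subsequence_range_py.2.2) = pvDiffWitnessOut_find_subsequence_range_py.1 ∧ find_subsequence_range_py_alt (pvDiffWitness_find_subsequence_range_py.1) (pvDiffWitness_find_subsequence_range_py.2.1)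 (pvDiffWitness_find_subsequence_range_py.2.2) = pvDiffWitnessOut_find_subsequence_range_py.2 ∧ pvDiffWitnessOut_find_subsequence_range_py.1 ≠ pvDiffWitnessOut_find_subsequence_range_py.2
def Claim_exact_find_subsequence_range_py : Prop := ∀ (hay : String) (needle : String) (start : Int), Dom_find_subsequence_range_py hay needle start → Pre_find_subsequence_range_py hay needle start → D_find_subsequence_range_py hay needle start → find_subsequence_range_py hay needle start ≠ find_subsequence_range_py_alt hay needle start
def Claim_raises_find_subsequence_range_py : Prop := (∀ (hay : String) (needle : String) (start : Int), Dom_find_subsequence_range_py hay needle start → Raises_find_subsequence_range_py hay needle start → ¬ Pre_find_subsequence_range_py hay needle start) ∧ (Dom_find_subsequence_range_py (pvRaiseWitness_find_subsequence_range_py.1) (pvRaiseWitness_find_subsequence_range_py.2.1) (pvRaiseWitness_find_subsequence_range_py.2.2) ∧ Raises_find_subsequence_range_py (pvRaiseWitness_find_subsequence_range_py.1) (pvRaiseWitness_find_subsequence_range_py.2.1) (pvRaiseWitness_find_subsequence_range_py.2.2) ∧ find_subsequence_range_py_alt (pvRaiseWitness_find_subsequence_range_py.1) (pvRaiseWitness_find_subsequence_range_py.2.1)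 (pvRaiseWitness_find_subsequence_range_py.2.2) = pvRaiseWitnessOut_find_subsequence_range_py)

-- ===== LEMMAS AND PROOFS =====

lemma pvALoop_unfold (h nd : List Char) (i : Int) (j : Nat) (first : Option Int) :
    pvALoop h nd i j first =
      if i < (h.length : Int) ∧ j < nd.length then
        (if PySem.List.pyGet? h i = PySem.List.pyGet? nd (j : Int) then
          pvALoop h nd (i + 1) (j + 1) (some (first.getD i))
        else
          pvALoop h nd (i + 1) j first)
      else
        if j = nd.length then first.map (fun f => (f, i)) else none := by
  unfold pvALoop
  rcases hf : ((h.length : Int) - i).toNat with _ | k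
  · rw [pvALoopF]
    rw [if_neg (show ¬(i < (h.length : Int) ∧ j < nd.length) by omega)]
  · rw [pvALoopF]
    have h1 : ((h.length : Int) - (i + 1)).toNat = k := by omega
    rw [h1]

-- the sequence of characters A's loop examines from index i (negative i wraps)
def pvScan (h : List Char) (i : Int) : List Char :=
  if i < 0 then h.drop (h.length + i).toNat ++ h else h.drop i.toNat

lemma pvScan_cons (h : List Char) (i : Int) (a : Char)
    (hget : PySem.List.pyGet? h i = some a) : pvScan h i = a :: pvScan h (i + 1) := by
  have hr : PySem.Raise.InRange h.length i := by
    by_contra hn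
    rw [(PySem.List.pyGet?_eq_none_iff h i).mpr hn] at hget
    simp at hget
  obtain ⟨hlow, hhigh⟩ : -(h.length : Int) ≤ i ∧ i < h.length := by
    simpa [PySem.Raise.InRange] using hr
  by_cases hi : i < 0
  · have hk : (h.length + i).toNat < h.length := by omega
    have hv : a = h[(h.length + i).toNat] := by
      rw [PySem.List.pyGet?, PySem.List.pyIdx?] at hget
      rw [if_neg (by omega), if_pos (by omega)] at hget
      simp only [Option.bind_some] at hget
      have : h.length - (-i).toNat = (h.length + i).toNat := by omega
      rw [this] at hget
      have := List.getElem?_eq_getElem (l := h) (i := (h.length + i).toNat) hk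
      rw [this] at hget
      exact (Option.some_inj.mp hget).symm
    rw [pvScan, pvScan, if_pos hi]
    rw [List.drop_eq_getElem_cons hk, ← hv]
    by_cases hi1 : i + 1 < 0
    · rw [if_pos hi1]
      have : (h.length + (i + 1)).toNat = (h.length + i).toNat + 1 := by omega
      rw [this]
      simp
    · rw [if_neg hi1]
      have h2 : (h.length + i).toNat + 1 = h.length := by omega
      have h3 : (i + 1).toNat = 0 := by omega
      rw [h2, h3, List.drop_length, List.drop_zero]
      simp
  · have h0 : 0 ≤ i := by omega
    have hk : i.toNat < h.length := by omega
    have hv : a = h[i.toNat] := by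
      rw [PySem.List.pyGet?_eq_some_getElem h h0 (by omega)] at hget
      exact (Option.some_inj.mp hget).symm
    rw [pvScan, pvScan, if_neg hi, if_neg (by omega), List.drop_eq_getElem_cons hk, ← hv]
    have : (i + 1).toNat = i.toNat + 1 := by omega
    rw [this]

lemma pvALoop_some (h nd : List Char) (n : Nat) : ∀ (i : Int) (j : Nat) (first : Option Int)
    (r : Int × Int), -(h.length : Int) ≤ i → j ≤ nd.length → (((h.length : Int) - i).toNat ≤ n) →
    pvALoop h nd i j first = some r → (nd.drop j).Sublist (pvScan h i) := by
  induction n with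
  | zero =>
    intro i j first r hlow hj hn hsome
    rw [pvALoop_unfold, if_neg (by omega)] at hsome
    by_cases hjl : j = nd.length
    · rw [hjl, List.drop_eq_nil_of_le (le_refl _)]
      exact List.nil_sublist _
    · rw [if_neg hjl] at hsome
      simp at hsome
  | succ m ih =>
    intro i j first r hlow hj hn hsome
    by_cases hcond : i < (h.length : Int) ∧ j < nd.length
    · obtain ⟨hi, hjlt⟩ := hcond
      have hr : PySem.Raise.InRange h.length i := by
        simp [PySem.Raise.InRange]; omega
      obtain ⟨a, ha⟩ : ∃ a, PySem.List.pyGet? h i = some a := by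
        rcases hg : PySem.List.pyGet? h i with _ | a
        · rw [PySem.List.pyGet?_eq_none_iff] at hg
          exact absurd hr hg
        · exact ⟨a, rfl⟩
      have hgn : PySem.List.pyGet? nd (j : Int) = some nd[j] := by
        rw [PySem.List.pyGet?_eq_some_getElem nd (by omega) (by omega)]
        simp
      rw [pvALoop_unfold, if_pos ⟨hi, hjlt⟩] at hsome
      rw [pvScan_cons h i a ha]
      by_cases hc : PySem.List.pyGet? h i = PySem.List.pyGet? nd (j : Int)
      · rw [if_pos hc] at hsome
        have hIH := ih (i + 1) (j + 1) _ r (by omega) (by omega) (by omega) hsome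
        have hav : a = nd[j] := by
          rw [ha, hgn] at hc
          exact Option.some_inj.mp hc
        rw [List.drop_eq_getElem_cons hjlt, hav]
        exact List.Sublist.cons₂ _ hIH
      · rw [if_neg hc] at hsome
        exact (ih (i + 1) j _ r (by omega) (by omega) (by omega) hsome).cons _
    · rw [pvALoop_unfold, if_neg hcond] at hsome
      by_cases hjl : j = nd.length
      · rw [hjl, List.drop_eq_nil_of_le (le_refl _)]
        exact List.nil_sublist _
      · rw [if_neg hjl] at hsome
        simp at hsome

-- the list of occurrence indices of c in h, in increasing order
def pvOccList (h : List Char) (c : Char) : List Int :=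
  ((PySem.List.enumerate h).filter (fun p => p.2 == c)).map (·.1)

lemma pvOcc_getD (h : List Char) (c : Char) :
    (pvOcc h).getD c [] = pvOccList h c := by
  unfold pvOcc pvOccList
  have hfold : (PySem.List.enumerate h).foldl
      (fun (d : PySem.Dict Char (List Int)) (p : Int × Char) => d.modify p.2 [] (· ++ [p.1])) PySem.Dict.empty
      = ((PySem.List.enumerate h).map Prod.swap).foldl
      (fun (d : PySem.Dict Char (List Int)) (p : Char × Int) => d.modify p.1 [] (· ++ [p.2])) PySem.Dict.empty := by
    rw [List.foldl_map]
    rfl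
  rw [hfold, PySem.Dict.getD_foldl_modify_append]
  simp [List.filter_map, List.map_map, Function.comp_def, Prod.swap]

lemma pvOccList_mem {h : List Char} {c : Char} {x : Int} (hx : x ∈ pvOccList h c) :
    ∃ k : Nat, x = (k : Int) ∧ ∃ hk : k < h.length, h[k] = c := by
  unfold pvOccList at hx
  simp only [List.mem_map, List.mem_filter] at hx
  obtain ⟨p, ⟨hpmem, hpc⟩, hpx⟩ := hx
  rw [PySem.List.mem_enumerate_iff] at hpmem
  obtain ⟨k, hk, rfl⟩ := hpmem
  refine ⟨k, by simpa using hpx.symm, hk, by simpa using hpc⟩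

lemma pvOccList_mem_of (h : List Char) (c : Char) (k : Nat) (hk : k < h.length)
    (hc : h[k] = c) : (k : Int) ∈ pvOccList h c := by
  unfold pvOccList
  simp only [List.mem_map, List.mem_filter]
  refine ⟨((k : Int), h[k]), ⟨?_, by simpa using hc⟩, by simp⟩
  rw [PySem.List.mem_enumerate_iff]
  exact ⟨k, hk, by simp⟩

lemma pvOccList_pairwise (h : List Char) (c : Char) : (pvOccList h c).Pairwise (· < ·) := by
  unfold pvOccList
  rw [List.pairwise_map]
  exact List.Pairwise.sublist List.filter_sublist (PySem.List.pairwise_lt_enumerate h 0)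

-- the suffix of a sorted occurrence list from its first element ≥ pos (proof-side view of the skip loop)
def pvDropLt (lst : List Int) (pos : Int) : List Int :=
  match lst with
  | [] => []
  | x :: rest => if x < pos then pvDropLt rest pos else x :: rest

lemma pvDropLt_eq_filter (lst : List Int) (pos : Int) (hs : lst.Pairwise (· < ·)) :
    pvDropLt lst pos = lst.filter (fun x => pos ≤ x) := by
  induction lst with
  | nil => rfl
  | cons x rest ih =>
    rw [pvDropLt, List.filter_cons]
    by_cases hx : x < pos
    · rw [if_pos hx, if_neg (by simpa using hx)]
      exact ih (List.Pairwise.of_cons hs)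
    · rw [if_neg hx, if_pos (by simpa using not_lt.mp hx)]
      congr 1
      symm
      apply List.filter_eq_self.mpr
      intro y hy
      have := List.rel_of_pairwise_cons hs hy
      simp only [decide_eq_true_eq]
      omega

lemma pvNext_past (h : List Char) (c : Char) (i : Int) (hlen : (h.length : Int) ≤ i) :
    pvDropLt (pvOccList h c) i = [] := by
  rw [pvDropLt_eq_filter _ _ (pvOccList_pairwise h c)]
  apply List.filter_eq_nil_iff.mpr
  intro x hx
  obtain ⟨k, rfl, hk, _⟩ := pvOccList_mem hx
  simp only [decide_eq_true_eq, not_le]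
  omega

lemma pvNext_step (h : List Char) (c : Char) (i : Int) (h0 : 0 ≤ i)
    (hi : i.toNat < h.length) (hc : h[i.toNat] ≠ c) :
    pvDropLt (pvOccList h c) i = pvDropLt (pvOccList h c) (i + 1) := by
  rw [pvDropLt_eq_filter _ _ (pvOccList_pairwise h c),
    pvDropLt_eq_filter _ _ (pvOccList_pairwise h c)]
  apply List.filter_congr
  intro x hx
  obtain ⟨k, rfl, hk, hkc⟩ := pvOccList_mem hx
  have hne : (k : Int) ≠ i := by
    intro he
    apply hc
    have hik : i.toNat = k := by omega
    have h1 : h[i.toNat]? = some c := by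
      rw [hik, List.getElem?_eq_getElem hk, hkc]
    rw [List.getElem?_eq_getElem hi] at h1
    exact Option.some_inj.mp h1
  simp only [decide_eq_decide]
  omega

lemma pvHead_of_sorted (l : List Int) (i : Int) (hs : l.Pairwise (· < ·))
    (hm : i ∈ l) (hlb : ∀ x ∈ l, i ≤ x) : ∃ t, l = i :: t := by
  cases l with
  | nil => cases hm
  | cons y t =>
    rcases List.mem_cons.mp hm with rfl | hmt
    · exact ⟨t, rfl⟩
    · exfalso
      have h1 := hlb y (List.mem_cons_self)
      have h2 := List.rel_of_pairwise_cons hs hmt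
      omega

lemma pvNext_self (h : List Char) (c : Char) (i : Int) (h0 : 0 ≤ i)
    (hi : i.toNat < h.length) (hc : h[i.toNat] = c) :
    ∃ t, pvDropLt (pvOccList h c) i = i :: t := by
  rw [pvDropLt_eq_filter _ _ (pvOccList_pairwise h c)]
  apply pvHead_of_sorted _ _ (List.Pairwise.filter _ (pvOccList_pairwise h c))
  · apply List.mem_filter.mpr
    constructor
    · have := pvOccList_mem_of h c i.toNat hi hc
      rwa [show ((i.toNat : Nat) : Int) = i by omega] at this
    · simp
  · intro x hx
    simpa using List.of_mem_filter hx

lemma pvNext_neg (h : List Char) (c : Char) (pos : Int) (hpos : pos ≤ 0) :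
    pvDropLt (pvOccList h c) pos = pvOccList h c := by
  rw [pvDropLt_eq_filter _ _ (pvOccList_pairwise h c)]
  apply List.filter_eq_self.mpr
  intro x hx
  obtain ⟨k, rfl, _, _⟩ := pvOccList_mem hx
  simp only [decide_eq_true_eq]
  omega

lemma pvSkipF_spec (lst : List Int) (pos : Int) : ∀ (fuel k : Nat), lst.length - k ≤ fuel →
    k ≤ pvSkipF lst pos fuel k ∧ (k ≤ lst.length → pvSkipF lst pos fuel k ≤ lst.length) ∧
    (∀ t, k ≤ t → t < pvSkipF lst pos fuel k → lst.getD t 0 < pos) ∧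
    (pvSkipF lst pos fuel k < lst.length → ¬ lst.getD (pvSkipF lst pos fuel k) 0 < pos) := by
  intro fuel
  induction fuel with
  | zero =>
    intro k hf
    rw [pvSkipF]
    exact ⟨le_rfl, fun h => h, fun t h1 h2 => absurd (lt_of_le_of_lt h1 h2) (lt_irrefl k),
      fun h => absurd h (by omega)⟩
  | succ m ih =>
    intro k hf
    rw [pvSkipF]
    by_cases hc : k < lst.length ∧ lst.getD k 0 < pos
    · rw [if_pos hc]
      obtain ⟨h1, h2, h3, h4⟩ := ih (k + 1) (by omega)
      refine ⟨by omega, fun _ => h2 (by omega), ?_, h4⟩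
      intro t ht1 ht2
      rcases Nat.eq_or_lt_of_le ht1 with rfl | ht1'
      · exact hc.2
      · exact h3 t (by omega) ht2
    · rw [if_neg hc]
      refine ⟨le_rfl, fun h => h, fun t h1 h2 => absurd (lt_of_le_of_lt h1 h2) (lt_irrefl k), ?_⟩
      intro hlt hval
      exact hc ⟨hlt, hval⟩

lemma pvSkip_spec (lst : List Int) (pos : Int) (k : Nat) (hk : k ≤ lst.length) :
    k ≤ pvSkip lst pos k ∧ pvSkip lst pos k ≤ lst.length ∧
    (∀ t, k ≤ t → t < pvSkip lst pos k → lst.getD t 0 < pos) ∧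
    (pvSkip lst pos k < lst.length → ¬ lst.getD (pvSkip lst pos k) 0 < pos) := by
  obtain ⟨h1, h2, h3, h4⟩ := pvSkipF_spec lst pos (lst.length - k) k le_rfl
  exact ⟨h1, h2 hk, h3, h4⟩

lemma pvSkip_drop (lst : List Int) (pos : Int) (k : Nat) (hs : lst.Pairwise (· < ·))
    (hk : k ≤ lst.length) (hpre : ∀ t, t < k → lst.getD t 0 < pos) :
    lst.drop (pvSkip lst pos k) = pvDropLt lst pos := by
  obtain ⟨h1, h2, h3, h4⟩ := pvSkip_spec lst pos k hk
  set k' := pvSkip lst pos k with hk'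
  have hall : ∀ t, t < k' → lst.getD t 0 < pos := by
    intro t ht
    by_cases htk : t < k
    · exact hpre t htk
    · exact h3 t (by omega) ht
  rw [pvDropLt_eq_filter _ _ hs]
  conv_rhs => rw [← List.take_append_drop k' lst]
  rw [List.filter_append]
  have htake : (lst.take k').filter (fun x => pos ≤ x) = [] := by
    apply List.filter_eq_nil_iff.mpr
    intro y hy
    obtain ⟨t, ht, hty⟩ := List.mem_iff_getElem.mp hy
    have htlen : t < k' := by
      have hmin : (lst.take k').length = min k' lst.length := List.length_take
      omega
    have : y = lst.getD t 0 := by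
      rw [List.getD_eq_getElem lst 0 (by omega), ← hty, List.getElem_take]
    simp only [decide_eq_true_eq, not_le]
    have := hall t htlen
    omega
  have hdrop : (lst.drop k').filter (fun x => pos ≤ x) = lst.drop k' := by
    apply List.filter_eq_self.mpr
    by_cases hk'len : k' < lst.length
    · rw [List.drop_eq_getElem_cons hk'len]
      intro y hy
      rcases List.mem_cons.mp hy with rfl | hyt
      · have := h4 hk'len
        rw [List.getD_eq_getElem lst 0 hk'len] at this
        simp only [decide_eq_true_eq]
        omega
      · have hps : (lst.drop k').Pairwise (· < ·) := List.Pairwise.sublist (List.drop_sublist _ _) hs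
        rw [List.drop_eq_getElem_cons hk'len] at hps
        have hlt := List.rel_of_pairwise_cons hps hyt
        have := h4 hk'len
        rw [List.getD_eq_getElem lst 0 hk'len] at this
        simp only [decide_eq_true_eq]
        omega
    · rw [List.drop_eq_nil_of_le (by omega)]
      intro y hy
      cases hy
  rw [htake, hdrop, List.nil_append]

-- loop invariant for B's cursor dictionary: every entry points past only
-- occurrences strictly below the current position
def pvInv (h : List Char) (cur : PySem.Dict Char Nat) (pos : Int) : Prop :=
  ∀ c : Char, cur.getD c 0 ≤ (pvOccList h c).length ∧
    ∀ t, t < cur.getD c 0 → (pvOccList h c).getD t 0 < pos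

lemma pvInv_empty (h : List Char) (pos : Int) : pvInv h PySem.Dict.empty pos := by
  intro c
  rw [PySem.Dict.getD_empty]
  exact ⟨Nat.zero_le _, fun t ht => absurd ht (by omega)⟩

lemma pvInv_mono (h : List Char) (cur : PySem.Dict Char Nat) (pos pos' : Int)
    (hle : pos ≤ pos') (hinv : pvInv h cur pos) : pvInv h cur pos' := by
  intro c
  obtain ⟨h1, h2⟩ := hinv c
  exact ⟨h1, fun t ht => lt_of_lt_of_le (h2 t ht) hle⟩

lemma pvBLoop_cons (h : List Char) (c : Char) (rest : List Char) (pos : Int)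
    (first : Option Int) (cur : PySem.Dict Char Nat) (hinv : pvInv h cur pos) :
    pvBLoop (pvOcc h) (c :: rest) pos first cur =
      match pvDropLt (pvOccList h c) pos with
      | [] => none
      | idx :: t => pvBLoop (pvOcc h) rest (idx + 1) (some (first.getD idx))
          (cur.insert c ((pvOccList h c).length - (idx :: t).length)) := by
  obtain ⟨hb, hall⟩ := hinv c
  have hdropk := pvSkip_drop (pvOccList h c) pos (cur.getD c 0) (pvOccList_pairwise h c) hb hall
  obtain ⟨_, hle, _, _⟩ := pvSkip_spec (pvOccList h c) pos (cur.getD c 0) hb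
  rw [pvBLoop]
  simp only [pvOcc_getD]
  rcases hF : pvDropLt (pvOccList h c) pos with _ | ⟨idx, t⟩
  · rw [hF] at hdropk
    have : (pvOccList h c).length ≤ pvSkip (pvOccList h c) pos (cur.getD c 0) := by
      by_contra hnot
      rw [List.drop_eq_getElem_cons (by omega)] at hdropk
      cases hdropk
    rw [if_pos (by omega)]
  · rw [hF] at hdropk
    have hklt : pvSkip (pvOccList h c) pos (cur.getD c 0) < (pvOccList h c).length := by
      by_contra hnot
      rw [List.drop_eq_nil_of_le (by omega)] at hdropk
      cases hdropk
    have hlen := congrArg List.length hdropk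
    rw [List.length_drop] at hlen
    simp only [List.length_cons] at hlen
    have hkval : pvSkip (pvOccList h c) pos (cur.getD c 0)
        = (pvOccList h c).length - (idx :: t).length := by
      simp only [List.length_cons]
      omega
    have hgd : (pvOccList h c).getD (pvSkip (pvOccList h c) pos (cur.getD c 0)) 0 = idx := by
      rw [List.getD_eq_getElem _ 0 hklt]
      rw [List.drop_eq_getElem_cons hklt] at hdropk
      exact (List.cons.injEq _ _ _ _ ▸ hdropk).1
    rw [if_neg (by omega), hgd, hkval]

lemma pvDropLt_head_mem (h : List Char) (c : Char) (pos idx : Int) (t : List Int)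
    (hF : pvDropLt (pvOccList h c) pos = idx :: t) :
    pos ≤ idx ∧ ∃ m : Nat, idx = (m : Int) ∧ ∃ hm : m < h.length, h[m] = c := by
  have hmem : idx ∈ pvDropLt (pvOccList h c) pos := by
    rw [hF]
    exact List.mem_cons_self
  rw [pvDropLt_eq_filter _ _ (pvOccList_pairwise h c)] at hmem
  exact ⟨by simpa using List.of_mem_filter hmem, pvOccList_mem (List.mem_of_mem_filter hmem)⟩

lemma pvInv_step (h : List Char) (c : Char) (cur : PySem.Dict Char Nat) (pos idx : Int)
    (t : List Int) (hinv : pvInv h cur pos)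
    (hF : pvDropLt (pvOccList h c) pos = idx :: t) :
    pvInv h (cur.insert c ((pvOccList h c).length - (idx :: t).length)) (idx + 1) := by
  have hposle := (pvDropLt_head_mem h c pos idx t hF).1
  have hdrop0 := pvSkip_drop (pvOccList h c) pos 0 (pvOccList_pairwise h c)
    (Nat.zero_le _) (fun t' ht' => absurd ht' (by omega))
  rw [hF] at hdrop0
  obtain ⟨_, hle0, _, _⟩ := pvSkip_spec (pvOccList h c) pos 0 (Nat.zero_le _)
  have hklt : pvSkip (pvOccList h c) pos 0 < (pvOccList h c).length := by
    by_contra hnot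
    rw [List.drop_eq_nil_of_le (by omega)] at hdrop0
    cases hdrop0
  have hlen := congrArg List.length hdrop0
  rw [List.length_drop] at hlen
  simp only [List.length_cons] at hlen
  have hkval : pvSkip (pvOccList h c) pos 0 = (pvOccList h c).length - (idx :: t).length := by
    simp only [List.length_cons]
    omega
  have hidxval : (pvOccList h c)[pvSkip (pvOccList h c) pos 0] = idx := by
    rw [List.drop_eq_getElem_cons hklt] at hdrop0
    exact (List.cons.injEq _ _ _ _ ▸ hdrop0).1
  intro c'
  rw [PySem.Dict.getD_insert]
  by_cases hcc : c' = c
  · rw [if_pos hcc, ← hkval]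
    subst hcc
    refine ⟨by omega, ?_⟩
    intro t' ht'
    have hlt : (pvOccList h c')[t']'(by omega) < (pvOccList h c')[pvSkip (pvOccList h c') pos 0] :=
      List.pairwise_iff_getElem.mp (pvOccList_pairwise h c') t' _ (by omega) (by omega) ht'
    rw [List.getD_eq_getElem _ 0 (by omega)]
    rw [hidxval] at hlt
    omega
  · rw [if_neg hcc]
    obtain ⟨h1, h2⟩ := hinv c'
    exact ⟨h1, fun t' ht' => by have := h2 t' ht'; omega⟩

lemma pvBLoop_neg (h : List Char) (c : Char) (rest : List Char) (pos : Int)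
    (first : Option Int) (hpos : pos ≤ 0) :
    pvBLoop (pvOcc h) (c :: rest) pos first PySem.Dict.empty
      = pvBLoop (pvOcc h) (c :: rest) 0 first PySem.Dict.empty := by
  rw [pvBLoop_cons h c rest pos first _ (pvInv_empty h pos),
    pvBLoop_cons h c rest 0 first _ (pvInv_empty h 0),
    pvNext_neg h c pos hpos, pvNext_neg h c 0 le_rfl]

lemma pvLoop_eq (h nd : List Char) (n : Nat) : ∀ (i : Int) (j : Nat) (first : Option Int)
    (cur : PySem.Dict Char Nat), 0 ≤ i → j ≤ nd.length → (((h.length : Int) - i).toNat ≤ n) →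
    pvInv h cur i →
    pvALoop h nd i j first = pvBLoop (pvOcc h) (nd.drop j) i first cur := by
  induction n with
  | zero =>
    intro i j first cur h0 hj hn hinv
    have hi : ¬ i < (h.length : Int) := by omega
    rw [pvALoop_unfold, if_neg (by tauto)]
    by_cases hjl : j = nd.length
    · rw [if_pos hjl, hjl, List.drop_eq_nil_of_le (le_refl _)]
      rfl
    · rw [if_neg hjl]
      have hjlt : j < nd.length := by omega
      rw [List.drop_eq_getElem_cons hjlt]
      rw [pvBLoop_cons h nd[j] _ i first cur hinv, pvNext_past h nd[j] i (by omega)]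
  | succ m ih =>
    intro i j first cur h0 hj hn hinv
    by_cases hjl : j = nd.length
    · rw [pvALoop_unfold, if_neg (by omega), if_pos hjl, hjl,
        List.drop_eq_nil_of_le (le_refl _)]
      rfl
    · have hjlt : j < nd.length := by omega
      by_cases hi : i < (h.length : Int)
      · have hitn : i.toNat < h.length := by omega
        have hgh : PySem.List.pyGet? h i = some h[i.toNat] :=
          PySem.List.pyGet?_eq_some_getElem h h0 hi
        have hgn : PySem.List.pyGet? nd (j : Int) = some nd[j] := by
          rw [PySem.List.pyGet?_eq_some_getElem nd (by omega) (by omega)]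
          simp
        rw [List.drop_eq_getElem_cons hjlt]
        by_cases hc : h[i.toNat] = nd[j]
        · obtain ⟨t, ht⟩ := pvNext_self h nd[j] i h0 hitn hc
          rw [pvALoop_unfold, if_pos ⟨hi, hjlt⟩, if_pos (by rw [hgh, hgn, hc]),
            ih (i + 1) (j + 1) _ _ (by omega) (by omega) (by omega)
              (pvInv_step h nd[j] cur i i t hinv ht),
            pvBLoop_cons h nd[j] _ i first cur hinv, ht]
        · rw [pvALoop_unfold, if_pos ⟨hi, hjlt⟩, if_neg (by rw [hgh, hgn]; simp [hc]),
            ih (i + 1) j _ cur (by omega) (by omega) (by omega)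
              (pvInv_mono h cur i (i + 1) (by omega) hinv),
            List.drop_eq_getElem_cons hjlt]
          rw [pvBLoop_cons h nd[j] _ (i + 1) first cur
              (pvInv_mono h cur i (i + 1) (by omega) hinv),
            pvBLoop_cons h nd[j] _ i first cur hinv,
            pvNext_step h nd[j] i h0 hitn hc]
      · rw [pvALoop_unfold, if_neg (by tauto), if_neg hjl, List.drop_eq_getElem_cons hjlt]
        rw [pvBLoop_cons h nd[j] _ i first cur hinv, pvNext_past h nd[j] i (by omega)]

lemma pvGet_neg (h : List Char) (i : Int) (hi : i < 0) (hlow : -(h.length : Int) ≤ i) :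
    PySem.List.pyGet? h i = some (h[(h.length + i).toNat]'(by omega)) := by
  rw [PySem.List.pyGet?, PySem.List.pyIdx?]
  rw [if_neg (by omega), if_pos (by omega)]
  simp only [Option.bind_some]
  have h1 : h.length - (-i).toNat = (h.length + i).toNat := by omega
  rw [h1]
  exact List.getElem?_eq_getElem (by omega)

lemma pvASkip (h : List Char) (c0 : Char) (nrest : List Char) (n : Nat) :
    ∀ (i : Int), i < 0 → -(h.length : Int) ≤ i → (-i).toNat ≤ n →
    c0 ∉ h.drop (h.length + i).toNat →
    pvALoop h (c0 :: nrest) i 0 none = pvALoop h (c0 :: nrest) 0 0 none := by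
  induction n with
  | zero => intro i hi hlow hn _; omega
  | succ m ih =>
    intro i hi hlow hn hnotin
    have hk : (h.length + i).toNat < h.length := by omega
    have hget := pvGet_neg h i hi hlow
    have hne : h[(h.length + i).toNat] ≠ c0 := by
      intro he
      apply hnotin
      rw [List.drop_eq_getElem_cons hk, he]
      exact List.mem_cons_self
    have hgn : PySem.List.pyGet? (c0 :: nrest) ((0 : Nat) : Int) = some c0 := by
      simp
    rw [pvALoop_unfold, if_pos (by constructor <;> [omega; simp]),
      if_neg (by rw [hget, hgn]; simp [hne])]
    by_cases hi1 : i + 1 < 0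
    · have hnotin' : c0 ∉ h.drop (h.length + (i + 1)).toNat := by
        intro hm
        apply hnotin
        have hdd : h.drop (h.length + (i + 1)).toNat
            = List.drop 1 (h.drop (h.length + i).toNat) := by
          rw [List.drop_drop]
          congr 1
          omega
        rw [hdd] at hm
        exact List.mem_of_mem_drop hm
      rw [ih (i + 1) hi1 (by omega) (by omega) hnotin']
    · have : i + 1 = 0 := by omega
      rw [this]

lemma pvBLoop_some (h : List Char) : ∀ (cs : List Char) (pos : Int) (first : Option Int)
    (cur : PySem.Dict Char Nat) (r : Int × Int), pvInv h cur pos →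
    pvBLoop (pvOcc h) cs pos first cur = some r → cs.Sublist (h.drop pos.toNat) := by
  intro cs
  induction cs with
  | nil => intro pos first cur r _ _; exact List.nil_sublist _
  | cons c rest ih =>
    intro pos first cur r hinv hsome
    rw [pvBLoop_cons h c rest pos first cur hinv] at hsome
    rcases hF : pvDropLt (pvOccList h c) pos with _ | ⟨idx, t⟩
    · rw [hF] at hsome
      simp at hsome
    · rw [hF] at hsome
      obtain ⟨hpos_le, k, rfl, hk, hkc⟩ := pvDropLt_head_mem h c pos idx t hF
      have hIH := ih _ _ _ r (pvInv_step h c cur pos _ t hinv hF) hsome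
      rw [show ((k : Int) + 1).toNat = k + 1 by omega] at hIH
      have h2 : (c :: rest).Sublist (h.drop k) := by
        rw [List.drop_eq_getElem_cons hk, hkc]
        exact List.Sublist.cons₂ _ hIH
      have h3 : (h.drop k).Sublist (h.drop pos.toNat) := by
        rw [show k = pos.toNat + (k - pos.toNat) by omega, ← List.drop_drop]
        exact List.drop_sublist _ _
      exact h2.trans h3

lemma pvBLoop_first (occ : PySem.Dict Char (List Int)) : ∀ (cs : List Char) (pos : Int)
    (f : Int) (cur : PySem.Dict Char Nat) (r : Int × Int),
    pvBLoop occ cs pos (some f) cur = some r → r.1 = f := by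
  intro cs
  induction cs with
  | nil =>
    intro pos f cur r hr
    rw [pvBLoop] at hr
    simp only [Option.map_some] at hr
    rw [← Option.some_inj.mp hr]
  | cons c rest ih =>
    intro pos f cur r hr
    rw [pvBLoop] at hr
    by_cases hk : pvSkip (occ.getD c []) pos (cur.getD c 0) = (occ.getD c []).length
    · rw [if_pos hk] at hr
      cases hr
    · rw [if_neg hk] at hr
      simpa using ih _ _ _ r hr

lemma pvBLoop_fst_nonneg (h : List Char) : ∀ (cs : List Char) (pos : Int)
    (cur : PySem.Dict Char Nat) (r : Int × Int), pvInv h cur pos →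
    pvBLoop (pvOcc h) cs pos none cur = some r → 0 ≤ r.1 := by
  intro cs
  induction cs with
  | nil => intro pos cur r _ hr; rw [pvBLoop] at hr; cases hr
  | cons c rest ih =>
    intro pos cur r hinv hr
    rw [pvBLoop_cons h c rest pos none cur hinv] at hr
    rcases hF : pvDropLt (pvOccList h c) pos with _ | ⟨idx, t⟩
    · rw [hF] at hr
      cases hr
    · rw [hF] at hr
      obtain ⟨_, k, hkval, _, _⟩ := pvDropLt_head_mem h c pos idx t hF
      have := pvBLoop_first (pvOcc h) rest (idx + 1) idx _ r (by simpa using hr)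
      omega

lemma pvA_complete (h nd : List Char) (n : Nat) : ∀ (i : Int) (j : Nat) (f : Int),
    -(h.length : Int) ≤ i → j ≤ nd.length → (((h.length : Int) - i).toNat ≤ n) →
    (nd.drop j).Sublist (pvScan h i) → ∃ e, pvALoop h nd i j (some f) = some (f, e) := by
  induction n with
  | zero =>
    intro i j f hlow hj hn hsub
    have hi : ¬ i < (h.length : Int) := by omega
    rw [pvALoop_unfold, if_neg (by tauto)]
    by_cases hjl : j = nd.length
    · rw [if_pos hjl]
      exact ⟨i, rfl⟩
    · exfalso
      have hjlt : j < nd.length := by omega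
      have hnil : pvScan h i = [] := by
        rw [pvScan, if_neg (by omega)]
        exact List.drop_eq_nil_of_le (by omega)
      rw [List.drop_eq_getElem_cons hjlt, hnil] at hsub
      cases hsub
  | succ m ih =>
    intro i j f hlow hj hn hsub
    by_cases hjl : j = nd.length
    · rw [pvALoop_unfold, if_neg (by omega), if_pos hjl]
      exact ⟨i, rfl⟩
    · have hjlt : j < nd.length := by omega
      by_cases hi : i < (h.length : Int)
      · obtain ⟨a, ha⟩ : ∃ a, PySem.List.pyGet? h i = some a := by
          rcases hg : PySem.List.pyGet? h i with _ | a
          · rw [PySem.List.pyGet?_eq_none_iff] at hg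
            exact absurd (by simp [PySem.Raise.InRange]; omega) hg
          · exact ⟨a, rfl⟩
        have hgn : PySem.List.pyGet? nd (j : Int) = some nd[j] := by
          rw [PySem.List.pyGet?_eq_some_getElem nd (by omega) (by omega)]
          simp
        rw [pvScan_cons h i a ha, List.drop_eq_getElem_cons hjlt] at hsub
        by_cases hc : a = nd[j]
        · rw [pvALoop_unfold, if_pos ⟨hi, hjlt⟩, if_pos (by rw [ha, hgn, hc])]
          have hsub' : (nd.drop (j + 1)).Sublist (pvScan h (i + 1)) := by
            rw [hc] at hsub
            exact List.cons_sublist_cons.mp hsub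
          have : some ((some f).getD i) = some f := by simp
          rw [this]
          exact ih (i + 1) (j + 1) f (by omega) (by omega) (by omega) hsub'
        · rw [pvALoop_unfold, if_pos ⟨hi, hjlt⟩, if_neg (by rw [ha, hgn]; simp [hc])]
          have hsub' : (nd.drop j).Sublist (pvScan h (i + 1)) := by
            rw [List.drop_eq_getElem_cons hjlt]
            cases hsub with
            | cons _ hs => exact hs
            | cons₂ _ hs => exact absurd rfl hc
          exact ih (i + 1) j f (by omega) (by omega) (by omega) hsub'
      · exfalso
        have hnil : pvScan h i = [] := by
          rw [pvScan, if_neg (by omega)]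
          exact List.drop_eq_nil_of_le (by omega)
        rw [List.drop_eq_getElem_cons hjlt, hnil] at hsub
        cases hsub

lemma pvA_neg (h : List Char) (c0 : Char) (nrest : List Char) (n : Nat) : ∀ (i i₀ : Int),
    -(h.length : Int) ≤ i → i ≤ i₀ → i₀ < 0 → PySem.List.pyGet? h i₀ = some c0 →
    ((c0 :: nrest).Sublist (pvScan h i)) → (((h.length : Int) - i).toNat ≤ n) →
    ∃ f e, pvALoop h (c0 :: nrest) i 0 none = some (f, e) ∧ f < 0 := by
  induction n with
  | zero => intro i i₀ hlow hle h0 hg hsub hn; omega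
  | succ m ih =>
    intro i i₀ hlow hle h0 hg hsub hn
    have hi : i < (h.length : Int) := by omega
    obtain ⟨a, ha⟩ : ∃ a, PySem.List.pyGet? h i = some a := by
      rcases hga : PySem.List.pyGet? h i with _ | a
      · rw [PySem.List.pyGet?_eq_none_iff] at hga
        exact absurd (by simp [PySem.Raise.InRange]; omega) hga
      · exact ⟨a, rfl⟩
    have hgn : PySem.List.pyGet? (c0 :: nrest) ((0 : Nat) : Int) = some c0 := by simp
    rw [pvScan_cons h i a ha] at hsub
    by_cases hc : a = c0
    · rw [pvALoop_unfold, if_pos (by constructor <;> [omega; simp]),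
        if_pos (by rw [ha, hgn, hc])]
      have hsub' : ((c0 :: nrest).drop 1).Sublist (pvScan h (i + 1)) := by
        rw [hc] at hsub
        simpa using List.cons_sublist_cons.mp hsub
      obtain ⟨e, he⟩ := pvA_complete h (c0 :: nrest) (((h.length : Int) - (i + 1)).toNat)
        (i + 1) 1 ((Option.none).getD i) (by omega) (by simp) le_rfl hsub'
      refine ⟨(Option.none).getD i, e, he, by simp; omega⟩
    · have hne : i ≠ i₀ := by
        intro he
        rw [he, hg] at ha
        exact hc (Option.some_inj.mp ha).symm
      rw [pvALoop_unfold, if_pos (by constructor <;> [omega; simp]),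
        if_neg (by rw [ha, hgn]; simp [hc])]
      have hsub' : ((c0 :: nrest)).Sublist (pvScan h (i + 1)) := by
        cases hsub with
        | cons _ hs => exact hs
        | cons₂ _ hs => exact absurd rfl hc
      exact ih (i + 1) i₀ (by omega) (by omega) h0 hg hsub' (by omega)

-- ===== VERDICT (by name: the statements are the Claim_ definitions above) =====
theorem find_subsequence_range_py_raises : Claim_raises_find_subsequence_range_py := by
  unfold Claim_raises_find_subsequence_range_py
  refine ⟨?_, by decide⟩
  rintro hay needle start _ ⟨hne, hlt⟩ hpre
  rcases hpre with hp | hp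
  · exact hne hp
  · omega

theorem find_subsequence_range_py_spec : Claim_unchanged_find_subsequence_range_py := by
  intro hay needle start hdom hpre hnD
  by_cases hne : needle = ""
  · simp [find_subsequence_range_py, find_subsequence_range_py_alt, hne]
  · rw [find_subsequence_range_py, find_subsequence_range_py_alt, if_neg hne, if_neg hne]
    by_cases hs : 0 ≤ start
    · rw [pvLoop_eq hay.toList needle.toList (((hay.toList.length : Int) - start).toNat)
        start 0 none PySem.Dict.empty hs (by omega) (le_refl _)
        (pvInv_empty hay.toList start), List.drop_zero]
    · have hs' : start < 0 := by omega
      have hpre' : -(hay.toList.length : Int) ≤ start := by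
        by_contra hlt
        exact find_subsequence_range_py_raises.1 hay needle start hdom ⟨hne, by omega⟩ hpre
      rcases hnl : needle.toList with _ | ⟨c0, nrest⟩
      · exact absurd (by rw [← String.ofList_toList (s := needle), hnl]) hne
      · by_cases hsubl : needle.toList.Sublist
            ((hay.toList.drop (hay.toList.length + start).toNat) ++ hay.toList)
        · -- first needle character does not occur in the tail, else D_ would hold
          have hmem : c0 ∉ hay.toList.drop (hay.toList.length + start).toNat := by
            intro hm
            exact hnD ⟨hne, hs', by rw [hnl]; simpa using hm, hsubl⟩
          rw [pvASkip hay.toList c0 nrest (-start).toNat start hs' hpre' le_rfl hmem,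
            show (pvALoop hay.toList (c0 :: nrest) 0 0 none
              = pvBLoop (pvOcc hay.toList) (c0 :: nrest) 0 none PySem.Dict.empty) from by
              have := pvLoop_eq hay.toList (c0 :: nrest) hay.toList.length 0 0 none
                PySem.Dict.empty le_rfl (by omega) (by omega) (pvInv_empty hay.toList 0)
              rwa [List.drop_zero] at this,
            ← pvBLoop_neg hay.toList c0 nrest start none (by omega)]
        · -- needle is not a subsequence of the wrapped region: both sides return none
          rw [hnl] at hsubl
          rcases hA : pvALoop hay.toList (c0 :: nrest) start 0 none with _ | r
          · rcases hB : pvBLoop (pvOcc hay.toList) (c0 :: nrest) start none PySem.Dict.empty with _ | r'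
            · rfl
            · exfalso
              apply hsubl
              have hsub := pvBLoop_some hay.toList (c0 :: nrest) start none PySem.Dict.empty r'
                (pvInv_empty hay.toList start) hB
              rw [show start.toNat = 0 by omega, List.drop_zero] at hsub
              exact hsub.trans (List.sublist_append_right _ _)
          · exfalso
            apply hsubl
            have hsub := pvALoop_some hay.toList (c0 :: nrest)
              (((hay.toList.length : Int) - start).toNat) start 0 none r hpre'
              (by omega) (le_refl _) hA
            rw [List.drop_zero, pvScan, if_pos hs'] at hsub
            exact hsub

theorem find_subsequence_range_py_changed : Claim_changed_find_subsequence_range_py := by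
  unfold Claim_changed_find_subsequence_range_py
  decide

theorem find_subsequence_range_py_tight : Claim_exact_find_subsequence_range_py := by
  intro hay needle start hdom hpre hD
  obtain ⟨hne, hs', hhead, hsubl⟩ := hD
  have hpre' : -(hay.toList.length : Int) ≤ start := by
    by_contra hlt
    exact find_subsequence_range_py_raises.1 hay needle start hdom ⟨hne, by omega⟩ hpre
  rcases hnl : needle.toList with _ | ⟨c0, nrest⟩
  · exact absurd (by rw [← String.ofList_toList (s := needle), hnl]) hne
  · rw [hnl] at hhead hsubl
    simp only [List.headI] at hhead
    have hi₀ : ∃ i₀ : Int, start ≤ i₀ ∧ i₀ < 0 ∧ PySem.List.pyGet? hay.toList i₀ = some c0 := by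
      obtain ⟨kk, hkk, hkkv⟩ := List.mem_iff_getElem.mp hhead
      have hdl : (List.drop ((hay.toList.length + start).toNat) hay.toList).length
          = hay.toList.length - ((hay.toList.length + start).toNat) := List.length_drop
      have hkklen : ((hay.toList.length : Int) + start).toNat + kk < hay.toList.length := by
        omega
      have hq : hay.toList[(((hay.toList.length : Int) + start).toNat + kk)]? = some c0 := by
        rw [← List.getElem?_drop, List.getElem?_eq_getElem hkk, hkkv]
      refine ⟨((((hay.toList.length : Int) + start).toNat + kk : Nat) : Int)
        - (hay.toList.length : Int), by omega, by omega, ?_⟩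
      rw [pvGet_neg hay.toList _ (by omega) (by omega)]
      have h1 : hay.toList[((hay.toList.length : Int)
          + (((((hay.toList.length : Int) + start).toNat + kk : Nat) : Int)
            - (hay.toList.length : Int))).toNat]? = some c0 := by
        rw [show ((hay.toList.length : Int)
          + (((((hay.toList.length : Int) + start).toNat + kk : Nat) : Int)
            - (hay.toList.length : Int))).toNat
          = ((hay.toList.length : Int) + start).toNat + kk by omega]
        exact hq
      rw [List.getElem?_eq_getElem (by omega)] at h1
      exact h1
    obtain ⟨i₀, hle, h0, hg⟩ := hi₀
    obtain ⟨f, e, hA, hf⟩ := pvA_neg hay.toList c0 nrest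
      (((hay.toList.length : Int) - start).toNat) start i₀ hpre' hle h0 hg
      (by rw [pvScan, if_pos hs']; exact hsubl) le_rfl
    rw [find_subsequence_range_py, find_subsequence_range_py_alt, if_neg hne, if_neg hne,
      hnl, hA]
    rcases hB : pvBLoop (pvOcc hay.toList) (c0 :: nrest) start none PySem.Dict.empty with _ | r
    · simp
    · have hr := pvBLoop_fst_nonneg hay.toList (c0 :: nrest) start PySem.Dict.empty r
        (pvInv_empty hay.toList start) hB
      intro heq
      have := Option.some_inj.mp heq
      rw [← this] at hr
      simp at hr
      omega
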